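-- pv_equiv track=rewrite | github.com/David-Chan-Ho2/notebooklm-clone | components/ManageNotebook.py | make_copy_name
-- ===== SOURCE A (Python) =====
-- def make_copy_name(base: str, choices: list[str]) -> str:
--         base = (base or "").strip()
--         if not base:
--             return ""
--
--         candidate = f"{base} (copy)"
--         if candidate not in choices:
--             return candidate
--
--         i = 2
--         while True:
--             candidate = f"{base} (copy {i})"
--             if candidate not in choices:
--                 return candidate
--             i += 1
-- ===== SOURCE B (Python) =====
-- def make_copy_name(base: str, choices: list[str]) -> str:
--     base = (base or "").strip()
--     if not base:
--         return ""
--     first = f"{base} (copy)"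
--     prefix = f"{base} (copy "
--     # Only names shaped like a copy of this base can collide with a candidate,
--     # and the answer is always among the first len(copies)+1 candidate names,
--     # so build a name -> index table for just those and collect which indices
--     # are taken in one pass.
--     copies = [name for name in choices
--               if name == first or (name.startswith(prefix) and name.endswith(")"))]
--     index_of = {first: 1}
--     for k in range(2, len(copies) + 2):
--         index_of[f"{base} (copy {k})"] = k
--     taken = {index_of[name] for name in copies if name in index_of}
--     i = 1
--     while i in taken:
--         i += 1
--     return first if i == 1 else f"{base} (copy {i})"
-- ===== Notes on version B (the rewrite author's own statement) =====
-- stated objective: alternative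
-- what changed: A probes candidate names one at a time, scanning the whole choices list for each probe; B filters choices down to copy-shaped names, precomputes a dict mapping the first len(copies)+1 candidate names to their indices, collects the taken indices in one pass, and returns the first index missing from that set.
import Mathlib
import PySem

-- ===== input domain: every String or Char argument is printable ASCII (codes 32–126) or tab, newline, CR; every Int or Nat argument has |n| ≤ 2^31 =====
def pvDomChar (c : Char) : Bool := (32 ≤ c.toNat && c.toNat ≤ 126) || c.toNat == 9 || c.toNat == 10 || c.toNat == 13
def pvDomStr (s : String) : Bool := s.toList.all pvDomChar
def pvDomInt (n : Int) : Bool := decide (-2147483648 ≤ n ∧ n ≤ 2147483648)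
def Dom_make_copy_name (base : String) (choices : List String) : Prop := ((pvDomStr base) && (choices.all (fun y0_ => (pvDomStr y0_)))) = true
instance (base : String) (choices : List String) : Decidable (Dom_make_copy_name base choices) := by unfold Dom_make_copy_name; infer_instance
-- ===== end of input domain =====

-- B replaces A's repeated candidate probing (each probe a full scan of `choices`) by a
-- filter for copy-shaped names, a candidate-name → index dict over those, one collecting
-- pass, and the least index missing from the collected set.

-- shared f-string builders: f"{base} (copy)" and f"{base} (copy {i})"
def pvCand1 (bl : List Char) : String := String.ofList (bl ++ (" (copy)".toList))
def pvCandK (bl : List Char) (i : Int) : String :=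
  String.ofList (bl ++ (" (copy ".toList) ++ PySem.Int.toChars i ++ [')'])

-- ===== PORT A =====
-- A's `while True` loop; the fuel argument only makes it total (choices.length + 1 always
-- suffices, proved below) — on fuel 0 it returns the current candidate.
def pvLoopA (bl : List Char) (choices : List String) (i : Int) : Nat → String
  | 0 => pvCandK bl i
  | f + 1 =>
    let candidate := pvCandK bl i
    if candidate ∈ choices then pvLoopA bl choices (i + 1) f else candidate

def make_copy_name (base : String) (choices : List String) : String :=
  -- `(base or "").strip()`: for a str argument, `base or ""` is base unless base = ""
  let b := PySem.Str.strip (if base = "" then "" else base)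
  if b = "" then ""
  else
    let bl := b.toList
    let candidate := pvCand1 bl
    if candidate ∈ choices then pvLoopA bl choices 2 (choices.length + 1) else candidate

-- ===== PORT B =====
-- Source B's list comprehension filter: copy-shaped names
def pvIsCopy (bl : List Char) (name : String) : Bool :=
  name == pvCand1 bl ||
    (PySem.Str.startswith name (String.ofList (bl ++ (" (copy ".toList))) &&
      PySem.Str.endswith name ")")

-- Source B's dict build: index_of = {first: 1}; for k in range(2, len(copies)+2): index_of[...] = k
def pvIndexOf (bl : List Char) (n : Nat) : PySem.Dict String Int :=
  (PySem.List.pyRange 2 ((n : Int) + 2) 1).foldl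
    (fun d k => d.insert (pvCandK bl k) k)
    (PySem.Dict.insert PySem.Dict.empty (pvCand1 bl) 1)

-- Source B's set comprehension {index_of[name] for name in choices if name in index_of}
def pvCollect (d : PySem.Dict String Int) (choices : List String) : PySem.Set Int :=
  choices.foldl
    (fun s name => match d.get? name with
      | some v => PySem.Set.add s v
      | none => s)
    PySem.Set.empty

-- Source B's `while i in taken: i += 1`; fuel (taken.length + 1 suffices) only makes it total
def pvLoopB (taken : PySem.Set Int) (i : Int) : Nat → Int
  | 0 => i
  | f + 1 => if taken.contains i then pvLoopB taken (i + 1) f else i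

def make_copy_name_alt (base : String) (choices : List String) : String :=
  let b := PySem.Str.strip (if base = "" then "" else base)
  if b = "" then ""
  else
    let bl := b.toList
    let copies := choices.filter (pvIsCopy bl)
    let index_of := pvIndexOf bl copies.length
    let taken := pvCollect index_of copies
    let i := pvLoopB taken 1 (taken.length + 1)
    if i = 1 then pvCand1 bl else pvCandK bl i

-- ===== PRECONDITION & SPEC =====
def Spec_make_copy_name (base : String) (choices : List String) (out : String) : Prop := out = make_copy_name_alt base choices
instance (base : String) (choices : List String) (out : String) : Decidable (Spec_make_copy_name base choices out) := by unfold Spec_make_copy_name; infer_instance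

-- ===== CLAIM (what is proved, stated in full; the proofs are below) =====
def Claim_equal_make_copy_name : Prop := ∀ (base : String) (choices : List String), Dom_make_copy_name base choices → Spec_make_copy_name base choices (make_copy_name base choices)

-- ===== LEMMAS AND PROOFS =====

theorem pvLoopB_eq (T : PySem.Set Int) (i : Int) (d fuel : Nat)
    (hd : d < fuel) (hstop : (i + d) ∉ T)
    (hmin : ∀ e : Nat, e < d → (i + e) ∈ T) :
    pvLoopB T i fuel = i + d := by
  induction d generalizing i fuel with
  | zero =>
    cases fuel with
    | zero => omega
    | succ f =>
      simp at hstop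
      simp [pvLoopB, hstop]
  | succ d ih =>
    cases fuel with
    | zero => omega
    | succ f =>
      have h0 : i ∈ T := by have := hmin 0 (by omega); simpa using this
      simp only [pvLoopB, PySem.Set.contains_iff]
      rw [if_pos h0]
      have hstop' : (i + 1) + (d : Int) ∉ T := by
        have he : (i + 1) + (d : Int) = i + ((d + 1 : Nat) : Int) := by push_cast; ring
        rw [he]; exact hstop
      have hmin' : ∀ e : Nat, e < d → (i + 1) + (e : Int) ∈ T := by
        intro e he
        have hmm := hmin (e + 1) (by omega)
        have heq : (i + 1) + (e : Int) = i + ((e + 1 : Nat) : Int) := by push_cast; ring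
        rw [heq]; exact hmm
      rw [ih (i + 1) f (by omega) hstop' hmin']
      push_cast; ring

theorem pvLoopA_eq (bl : List Char) (choices : List String) (i : Int) (d fuel : Nat)
    (hd : d < fuel) (hstop : pvCandK bl (i + d) ∉ choices)
    (hmin : ∀ e : Nat, e < d → pvCandK bl (i + e) ∈ choices) :
    pvLoopA bl choices i fuel = pvCandK bl (i + d) := by
  induction d generalizing i fuel with
  | zero =>
    cases fuel with
    | zero => omega
    | succ f =>
      simp at hstop
      simp [pvLoopA, hstop]
  | succ d ih =>
    cases fuel with
    | zero => omega
    | succ f =>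
      have h0 : pvCandK bl i ∈ choices := by have := hmin 0 (by omega); simpa using this
      simp only [pvLoopA]
      rw [if_pos h0]
      have hstop' : pvCandK bl ((i + 1) + (d : Int)) ∉ choices := by
        have he : (i + 1) + (d : Int) = i + ((d + 1 : Nat) : Int) := by push_cast; ring
        rw [he]; exact hstop
      have hmin' : ∀ e : Nat, e < d → pvCandK bl ((i + 1) + (e : Int)) ∈ choices := by
        intro e he
        have hmm := hmin (e + 1) (by omega)
        have heq : (i + 1) + (e : Int) = i + ((e + 1 : Nat) : Int) := by push_cast; ring
        rw [heq]; exact hmm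
      rw [ih (i + 1) f (by omega) hstop' hmin']
      congr 1
      push_cast; ring

theorem pvPigeonhole (T : List Int) : ∃ d : Nat, d ≤ T.length ∧ (1 + (d : Int)) ∉ T := by
  by_contra h
  simp only [not_exists, not_and, not_not] at h
  have hinj : Function.Injective (fun d : Nat => 1 + (d : Int)) := by
    intro a b hab
    simp only at hab
    omega
  have hsub : Finset.image (fun d : Nat => 1 + (d : Int)) (Finset.range (T.length + 1)) ⊆ T.toFinset := by
    intro x hx
    simp only [Finset.mem_image, Finset.mem_range] at hx
    obtain ⟨d, hd, rfl⟩ := hx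
    simpa using h d (by omega)
  have hcard := Finset.card_le_card hsub
  rw [Finset.card_image_of_injective _ hinj, Finset.card_range] at hcard
  have := T.toFinset_card_le
  omega

theorem pvCore_acc (fuel : Nat) : ∀ (n : Nat) (ds : List Char),
    Nat.toDigitsCore 10 fuel n ds = Nat.toDigitsCore 10 fuel n [] ++ ds := by
  induction fuel with
  | zero => intro n ds; rfl
  | succ f ih =>
    intro n ds
    rw [Nat.toDigitsCore]
    conv_rhs => rw [Nat.toDigitsCore]
    split_ifs with h10
    · simp
    · rw [ih (n / 10) ((n % 10).digitChar :: ds), ih (n / 10) [(n % 10).digitChar]]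
      simp

theorem pvDigitChar48 (m : Nat) (h : m < 10) : (Nat.digitChar m).toNat = m + 48 := by
  interval_cases m <;> decide

theorem pvCore_val (fuel n : Nat) (h : n < fuel) :
    ∀ a : Int, (Nat.toDigitsCore 10 fuel n []).foldl (fun k ch => k * 10 + ((ch.toNat : Int) - 48)) a
      = a * 10 ^ (Nat.toDigitsCore 10 fuel n []).length + n := by
  induction fuel generalizing n with
  | zero => omega
  | succ f ih =>
    rw [Nat.toDigitsCore]
    by_cases h10 : n / 10 = 0
    · rw [if_pos h10]
      have hm : n % 10 < 10 := by omega
      have hn : n % 10 = n := by omega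
      intro a
      have h48 : ((n % 10).digitChar.toNat : Int) = ((n % 10 : Nat) : Int) + 48 := by
        exact_mod_cast congrArg (Nat.cast : Nat → Int) (pvDigitChar48 (n % 10) hm)
      simp only [List.foldl_cons, List.foldl_nil, List.length_cons, List.length_nil, zero_add]
      rw [h48, hn, pow_one]
      ring
    · rw [if_neg h10]
      have hlt : n / 10 < f := by omega
      have hih := ih (n / 10) hlt
      rw [pvCore_acc f (n / 10) [(n % 10).digitChar]]
      intro a
      rw [List.foldl_append, hih a]
      have hm : n % 10 < 10 := by omega
      have h48 : ((n % 10).digitChar.toNat : Int) = ((n % 10 : Nat) : Int) + 48 := by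
        exact_mod_cast congrArg (Nat.cast : Nat → Int) (pvDigitChar48 (n % 10) hm)
      have hq : (n : Int) = 10 * ((n / 10 : Nat) : Int) + ((n % 10 : Nat) : Int) := by omega
      simp only [List.foldl_cons, List.foldl_nil, List.length_append, List.length_cons,
        List.length_nil, zero_add]
      rw [h48, pow_succ, hq]
      ring

theorem pvToChars_val (i : Int) (h : 0 ≤ i) :
    (PySem.Int.toChars i).foldl (fun k ch => k * 10 + ((ch.toNat : Int) - 48)) 0 = i := by
  have hneg : ¬ i < 0 := by omega
  have hval := pvCore_val (i.toNat + 1) i.toNat (by omega) 0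
  rw [PySem.Int.toChars, if_neg hneg]
  unfold Nat.toDigits
  rw [hval]
  simp
  omega

theorem pvCandK_inj (bl : List Char) (i j : Int) (hi : 0 ≤ i) (hj : 0 ≤ j)
    (h : pvCandK bl i = pvCandK bl j) : i = j := by
  have h' := congrArg String.toList h
  simp only [pvCandK, String.toList_ofList, List.append_assoc] at h'
  have h2 := List.append_cancel_left (List.append_cancel_left h')
  have h3 : PySem.Int.toChars i = PySem.Int.toChars j := List.append_cancel_right h2
  have hv := pvToChars_val i hi
  rw [h3, pvToChars_val j hj] at hv
  omega

theorem pvCand1_ne_candK (bl : List Char) (i : Int) : pvCand1 bl ≠ pvCandK bl i := by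
  intro heq
  have hlen := congrArg (fun s => s.toList.length) heq
  have hne : PySem.Int.toChars i ≠ [] := by
    rw [PySem.Int.toChars]
    split_ifs
    · simp
    · unfold Nat.toDigits
      rw [Nat.toDigitsCore]
      split_ifs
      · simp
      · rw [pvCore_acc]
        simp
  simp [pvCand1, pvCandK] at hlen

-- dict lookup characterization: index_of maps exactly cand1 ↦ 1 and candK k ↦ k for 2 ≤ k ≤ n+1
theorem pvGet_pvIndexOf (bl : List Char) (n : Nat) (c : String) (v : Int) :
    (pvIndexOf bl n).get? c = some v ↔
      (c = pvCand1 bl ∧ v = 1) ∨ (∃ k : Int, 2 ≤ k ∧ k ≤ (n : Int) + 1 ∧ c = pvCandK bl k ∧ v = k) := by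
  induction n with
  | zero =>
    simp only [pvIndexOf]
    rw [show ((0 : Nat) : Int) + 2 = 2 by norm_num,
      show PySem.List.pyRange 2 2 1 = [] by simp]
    simp only [List.foldl_nil, PySem.Dict.get?_insert, PySem.Dict.get?_empty]
    constructor
    · intro h
      by_cases hc : c = pvCand1 bl
      · rw [if_pos hc] at h
        exact Or.inl ⟨hc, by injection h; omega⟩
      · rw [if_neg hc] at h
        cases h
    · rintro (⟨rfl, rfl⟩ | ⟨k, hk2, hk1, rfl, rfl⟩)
      · rw [if_pos rfl]
      · omega
  | succ m ih =>
    have hsplit : PySem.List.pyRange 2 ((m + 1 : Nat) + 2) 1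
        = PySem.List.pyRange 2 ((m : Nat) + 2) 1 ++ [((m : Nat) : Int) + 2] := by
      have h1 : ((m + 1 : Nat) : Int) + 2 = (((m : Nat) : Int) + 2) + 1 := by push_cast; ring
      rw [h1, PySem.List.pyRange_one_succ_right (by omega)]
    simp only [pvIndexOf] at ih ⊢
    rw [hsplit, List.foldl_append]
    simp only [List.foldl_cons, List.foldl_nil, PySem.Dict.get?_insert]
    constructor
    · intro h
      by_cases hc : c = pvCandK bl (((m : Nat) : Int) + 2)
      · rw [if_pos hc] at h
        subst hc
        right
        exact ⟨((m : Nat) : Int) + 2, by omega, by omega, rfl, by injection h; omega⟩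
      · rw [if_neg hc] at h
        rcases ih.mp h with h1 | ⟨k, hk2, hk1, rfl, hvk⟩
        · exact Or.inl h1
        · exact Or.inr ⟨k, hk2, by push_cast; omega, rfl, hvk⟩
    · rintro (⟨rfl, rfl⟩ | ⟨k, hk2, hk1, rfl, hvk⟩)
      · rw [if_neg (pvCand1_ne_candK bl _)]
        exact ih.mpr (Or.inl ⟨rfl, rfl⟩)
      · subst hvk
        by_cases hk : v = ((m : Nat) : Int) + 2
        · subst hk
          rw [if_pos rfl]
        · have hne : pvCandK bl v ≠ pvCandK bl (((m : Nat) : Int) + 2) := by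
            intro he
            exact hk (pvCandK_inj bl v _ (by omega) (by omega) he)
          rw [if_neg hne]
          exact ih.mpr (Or.inr ⟨v, hk2, by push_cast at hk1 ⊢; omega, rfl, rfl⟩)

theorem pvMem_collect (d : PySem.Dict String Int) (choices : List String) (x : Int) :
    x ∈ pvCollect d choices ↔ ∃ c ∈ choices, d.get? c = some x := by
  suffices h : ∀ s : PySem.Set Int,
      x ∈ choices.foldl
        (fun s name => match d.get? name with
          | some v => PySem.Set.add s v
          | none => s) s ↔ x ∈ s ∨ ∃ c ∈ choices, d.get? c = some x by
    have := h PySem.Set.empty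
    simpa [pvCollect, PySem.Set.empty] using this
  induction choices with
  | nil => simp
  | cons c cs ih =>
    intro s
    simp only [List.foldl_cons]
    cases h : d.get? c with
    | none =>
      rw [ih]
      constructor
      · rintro (hx | ⟨c', hc', hg⟩)
        · exact Or.inl hx
        · exact Or.inr ⟨c', List.mem_cons_of_mem _ hc', hg⟩
      · rintro (hx | ⟨c', hc', hg⟩)
        · exact Or.inl hx
        · rcases List.mem_cons.mp hc' with rfl | hc''
          · rw [h] at hg; cases hg
          · exact Or.inr ⟨c', hc'', hg⟩
    | some v =>
      rw [ih]
      constructor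
      · rintro (hx | ⟨c', hc', hg⟩)
        · rcases (PySem.Set.mem_add s v x).mp hx with hx' | rfl
          · exact Or.inl hx'
          · exact Or.inr ⟨c, List.mem_cons_self, h⟩
        · exact Or.inr ⟨c', List.mem_cons_of_mem _ hc', hg⟩
      · rintro (hx | ⟨c', hc', hg⟩)
        · exact Or.inl ((PySem.Set.mem_add s v x).mpr (Or.inl hx))
        · rcases List.mem_cons.mp hc' with rfl | hc''
          · rw [h] at hg
            injection hg with hg
            exact Or.inl ((PySem.Set.mem_add s v x).mpr (Or.inr hg.symm))
          · exact Or.inr ⟨c', hc'', hg⟩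

theorem pvLen_collect (d : PySem.Dict String Int) (choices : List String) :
    (pvCollect d choices).length ≤ choices.length := by
  suffices h : ∀ s : PySem.Set Int,
      (choices.foldl
        (fun s name => match d.get? name with
          | some v => PySem.Set.add s v
          | none => s) s).length ≤ s.length + choices.length by
    have := h PySem.Set.empty
    simpa [pvCollect, PySem.Set.empty] using this
  induction choices with
  | nil => simp
  | cons c cs ih =>
    intro s
    simp only [List.foldl_cons]
    have hadd : ∀ v : Int, (PySem.Set.add s v).length ≤ s.length + 1 := by
      intro v
      simp [PySem.Set.add]
      split_ifs <;> simp
    cases h : d.get? c with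
    | none =>
      calc _ ≤ s.length + cs.length := ih s
        _ ≤ s.length + (c :: cs).length := by simp
    | some v =>
      calc _ ≤ (PySem.Set.add s v).length + cs.length := ih _
        _ ≤ s.length + (c :: cs).length := by have := hadd v; simp at *; omega

-- membership in B's `taken` set, for indices in the table's range
theorem pvMem_taken_iff (bl : List Char) (choices : List String) (j : Int)
    (hj1 : 1 ≤ j) (hjn : j ≤ (choices.length : Int) + 1) :
    (j ∈ pvCollect (pvIndexOf bl choices.length) choices) ↔
      (if j = 1 then pvCand1 bl else pvCandK bl j) ∈ choices := by
  rw [pvMem_collect]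
  constructor
  · rintro ⟨c, hc, hg⟩
    rcases (pvGet_pvIndexOf bl choices.length c j).mp hg with ⟨rfl, rfl⟩ | ⟨k, hk2, _, rfl, rfl⟩
    · simpa using hc
    · rw [if_neg (by omega)]
      exact hc
  · intro hc
    by_cases h1 : j = 1
    · subst h1
      rw [if_pos rfl] at hc
      exact ⟨pvCand1 bl, hc,
        (pvGet_pvIndexOf bl choices.length _ 1).mpr (Or.inl ⟨rfl, rfl⟩)⟩
    · rw [if_neg h1] at hc
      exact ⟨pvCandK bl j, hc,
        (pvGet_pvIndexOf bl choices.length _ j).mpr (Or.inr ⟨j, by omega, hjn, rfl, rfl⟩)⟩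

theorem pvIsCopy_cand1 (bl : List Char) : pvIsCopy bl (pvCand1 bl) = true := by
  simp [pvIsCopy]

theorem pvIsCopy_candK (bl : List Char) (i : Int) : pvIsCopy bl (pvCandK bl i) = true := by
  have htl : (pvCandK bl i).toList
      = (bl ++ " (copy ".toList) ++ (PySem.Int.toChars i ++ [')']) := by
    simp [pvCandK]
  simp only [pvIsCopy, Bool.or_eq_true, Bool.and_eq_true]
  right
  constructor
  · rw [PySem.Str.startswith_eq, String.toList_ofList, htl, PySem.Chars.startswith_iff]
    exact List.prefix_append _ _
  · rw [PySem.Str.endswith_eq, htl, PySem.Chars.endswith_iff]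
    exact ⟨(bl ++ " (copy ".toList) ++ PySem.Int.toChars i, by simp⟩

-- ===== VERDICT (by name: the statement is the Claim_ definition above) =====
set_option maxHeartbeats 1000000 in
theorem make_copy_name_spec : Claim_equal_make_copy_name := by
  intro base choices _
  unfold Spec_make_copy_name
  simp only [make_copy_name, make_copy_name_alt]
  by_cases hb : PySem.Str.strip (if base = "" then "" else base) = ""
  · simp [hb]
  · rw [if_neg hb, if_neg hb]
    set bl := (PySem.Str.strip (if base = "" then "" else base)).toList with hbl
    set cps := choices.filter (pvIsCopy bl) with hcps
    have hcle : cps.length ≤ choices.length := List.length_filter_le _ _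
    set T := pvCollect (pvIndexOf bl cps.length) cps with hT
    have hTlen : T.length ≤ cps.length := pvLen_collect _ _
    have hmemT : ∀ j : Int, 1 ≤ j → j ≤ (cps.length : Int) + 1 →
        (j ∈ T ↔ (if j = 1 then pvCand1 bl else pvCandK bl j) ∈ choices) := by
      intro j hj1 hjn
      rw [hT, pvMem_taken_iff bl cps j hj1 hjn]
      constructor
      · intro h
        exact (List.mem_filter.mp h).1
      · intro h
        rw [hcps, List.mem_filter]
        refine ⟨h, ?_⟩
        split_ifs <;> simp [pvIsCopy_cand1, pvIsCopy_candK]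
    have hex : ∃ d : Nat, (1 + (d : Int)) ∉ T := by
      obtain ⟨d, _, hd⟩ := pvPigeonhole T
      exact ⟨d, hd⟩
    set d := Nat.find hex with hd
    have hdP : (1 + (d : Int)) ∉ T := Nat.find_spec hex
    have hdmin : ∀ e : Nat, e < d → (1 + (e : Int)) ∈ T := by
      intro e he
      have := Nat.find_min hex he
      exact not_not.mp this
    have hdle : d ≤ T.length := by
      obtain ⟨d', hle, hd'⟩ := pvPigeonhole T
      exact le_trans (Nat.find_min' hex hd') hle
    have hB : pvLoopB T 1 (T.length + 1) = 1 + d :=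
      pvLoopB_eq T 1 d (T.length + 1) (by omega) hdP hdmin
    rw [hB]
    by_cases hc1 : pvCand1 bl ∈ choices
    · have h1T : (1 : Int) ∈ T := by
        rw [hmemT 1 (by omega) (by omega)]
        simpa using hc1
      have hd1 : 1 ≤ d := by
        rcases Nat.eq_zero_or_pos d with h | h
        · exfalso
          apply hdP
          rw [h]
          simpa using h1T
        · exact h
      rw [if_pos hc1]
      have hA : pvLoopA bl choices 2 (choices.length + 1) = pvCandK bl (2 + ((d - 1 : Nat) : Int)) := by
        apply pvLoopA_eq
        · omega
        · have harg : (2 + ((d - 1 : Nat) : Int)) = 1 + (d : Int) := by omega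
          rw [harg]
          intro hmem
          apply hdP
          rw [hmemT (1 + (d : Int)) (by omega) (by omega)]
          rw [if_neg (by omega)]
          exact hmem
        · intro e he
          have hmem := hdmin (e + 1) (by omega)
          rw [hmemT (1 + ((e + 1 : Nat) : Int)) (by push_cast; omega)
            (by push_cast; omega)] at hmem
          rw [if_neg (by push_cast; omega)] at hmem
          have harg : (2 + (e : Int)) = 1 + ((e + 1 : Nat) : Int) := by push_cast; ring
          rw [harg]
          exact hmem
      rw [hA]
      rw [if_neg (show ¬(1 + (d : Int) = 1) by omega)]
      have harg2 : (2 + ((d - 1 : Nat) : Int)) = 1 + (d : Int) := by omega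
      rw [harg2]
    · have h1T : (1 : Int) ∉ T := by
        rw [hmemT 1 (by omega) (by omega)]
        simpa using hc1
      have hd0 : d = 0 := by
        have h0 : (1 + ((0 : Nat) : Int)) ∉ T := by simpa using h1T
        exact Nat.le_zero.mp (Nat.find_min' hex h0)
      rw [if_neg hc1, hd0]
      norm_num
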